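-- pv_equiv track=rewrite | github.com/Rahul2k5/cf_codes | exp.py | expensive
-- ===== SOURCE A (Python) =====
-- def expensive(a):
--     wei=0
--     n=len(a)
--     a = ' ' + a
--     for i in range(n, 0, -1):
--         if a[i] != '0':
--             wei = i
--             break
--     ans = 0
--     for i in range(1, wei):
--         if a[i] != '0':
--             ans += 1
--     ans += n - wei
--     return ans
-- ===== SOURCE B (Python) =====
-- def expensive(a):
--     nz = 0
--     run = 0
--     for c in a:
--         if c == '0':
--             run += 1
--         else:
--             nz += 1
--             run = 0
--     return len(a) if nz == 0 else nz - 1 + run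
-- ===== Notes on version B (the rewrite author's own statement) =====
-- stated objective: simpler
-- what changed: Replaces A's backward index scan for the last nonzero plus a second counting loop over a 1-based padded string with a single forward pass maintaining two counters (total nonzeros and the current run of zeros), combined in closed form nz - 1 + run (len(a) when there is no nonzero).
import Mathlib
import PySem

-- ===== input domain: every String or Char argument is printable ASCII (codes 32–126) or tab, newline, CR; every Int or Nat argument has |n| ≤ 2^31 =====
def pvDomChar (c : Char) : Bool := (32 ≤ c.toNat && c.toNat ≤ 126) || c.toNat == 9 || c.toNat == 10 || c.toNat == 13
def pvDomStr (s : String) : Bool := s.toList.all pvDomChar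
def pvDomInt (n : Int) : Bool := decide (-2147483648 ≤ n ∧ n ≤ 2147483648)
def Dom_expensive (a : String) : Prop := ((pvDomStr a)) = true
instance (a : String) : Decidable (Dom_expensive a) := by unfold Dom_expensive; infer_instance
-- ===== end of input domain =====

-- B replaces A's backward scan for the last nonzero plus a second counting loop by ONE forward
-- pass keeping two counters (nonzeros seen, current zero run) combined in closed form
-- (objective: simpler; same asymptotic cost).

-- ===== PORT A =====
-- for i in range(n, 0, -1): if a[i] != '0': wei = i; break   (wei stays 0 if no break)
def expensiveLoop1 (s : List Char) : List Int → Int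
  | [] => 0
  | i :: rest =>
      if PySem.List.pyGetD s i ' ' ≠ '0' then i else expensiveLoop1 s rest

-- for i in range(1, wei): if a[i] != '0': ans += 1
def expensiveLoop2 (s : List Char) (idxs : List Int) : Int :=
  idxs.foldl (fun ans i => if PySem.List.pyGetD s i ' ' ≠ '0' then ans + 1 else ans) 0

def expensive (a : String) : Int :=
  let n : Int := PySem.Str.len a
  let s : List Char := ' ' :: a.toList          -- a = ' ' + a
  let wei := expensiveLoop1 s (PySem.List.pyRange n 0 (-1))
  let ans := expensiveLoop2 s (PySem.List.pyRange 1 wei 1)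
  ans + (n - wei)

-- ===== PORT B =====
-- single forward pass: nz = nonzeros so far, run = zeros since the last nonzero
def expensive_alt (a : String) : Int :=
  let st := a.toList.foldl
      (fun (p : Int × Int) c => if c = '0' then (p.1, p.2 + 1) else (p.1 + 1, 0)) (0, 0)
  if st.1 = 0 then PySem.Str.len a else st.1 - 1 + st.2

-- ===== PRECONDITION & SPEC =====
def Spec_expensive (a : String) (out : Int) : Prop := out = expensive_alt a
instance (a : String) (out : Int) : Decidable (Spec_expensive a out) := by unfold Spec_expensive; infer_instance

-- ===== CLAIM (what is proved, stated in full; the proofs are below) =====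
def Claim_equal_expensive : Prop := ∀ (a : String), Dom_expensive a → Spec_expensive a (expensive a)

-- ===== LEMMAS AND PROOFS =====

-- loop1 only reads the indices it is given
theorem expensiveLoop1_congr (s t : List Char) (idxs : List Int)
    (h : ∀ i ∈ idxs, PySem.List.pyGetD s i ' ' = PySem.List.pyGetD t i ' ') :
    expensiveLoop1 s idxs = expensiveLoop1 t idxs := by
  induction idxs with
  | nil => rfl
  | cons i rest ih =>
      simp only [expensiveLoop1, h i (List.mem_cons_self ..)]
      split <;> [rfl; exact ih (fun j hj => h j (List.mem_cons_of_mem _ hj))]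

-- wei = length of l with its trailing run of '0' removed (0 when all zeros)
theorem expensiveLoop1_spec (l : List Char) :
    expensiveLoop1 (' ' :: l) (PySem.List.pyRange (l.length : Int) 0 (-1))
      = ((l.reverse.dropWhile (· == '0')).length : Int) := by
  induction l using List.reverseRecOn with
  | nil => simp [PySem.List.pyRange_neg_one_eq_nil, expensiveLoop1]
  | append_singleton xs x ih =>
      have hlen : ((xs ++ [x]).length : Int) = (xs.length : Int) + 1 := by simp
      rw [hlen, PySem.List.pyRange_neg_one_cons (by omega)]
      have hget : PySem.List.pyGetD (' ' :: (xs ++ [x])) ((xs.length : Int) + 1) ' ' = x := by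
        have hc : ((xs.length : Int) + 1) = ((xs.length + 1 : Nat) : Int) := by push_cast; ring
        rw [hc, PySem.List.pyGetD_natCast]
        simp [List.getD_eq_getElem?_getD]
      have hran : ((xs.length : Int) + 1 - 1) = (xs.length : Int) := by ring
      simp only [expensiveLoop1, hget, hran]
      by_cases hx : x = '0'
      · subst hx
        simp only [ne_eq, not_true_eq_false, if_false, List.reverse_append,
          List.reverse_cons, List.reverse_nil, List.nil_append, List.cons_append,
          List.dropWhile_cons, beq_self_eq_true, if_true]
        rw [← ih]
        apply expensiveLoop1_congr
        intro i hi
        rw [PySem.List.mem_pyRange_neg_one] at hi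
        have h0 : 0 ≤ i := by omega
        rw [PySem.List.pyGetD_of_nonneg (h := h0), PySem.List.pyGetD_of_nonneg (h := h0)]
        have hlt : i.toNat < (' ' :: xs).length := by simp; omega
        show (' ' :: (xs ++ ['0'])).getD i.toNat ' ' = (' ' :: xs).getD i.toNat ' '
        have hsplit : (' ' :: (xs ++ ['0'])) = (' ' :: xs) ++ ['0'] := by simp
        rw [hsplit, List.getD_eq_getElem?_getD, List.getD_eq_getElem?_getD,
          List.getElem?_append_left hlt]
      · simp only [ne_eq, hx, not_false_eq_true, if_true]
        simp only [List.reverse_append, List.reverse_cons, List.reverse_nil,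
          List.nil_append, List.cons_append, List.dropWhile_cons]
        have hb : (x == '0') = false := by simpa using hx
        simp [hb]

-- ans = count of non-'0' chars among the first m-1 chars of l
theorem expensiveLoop2_spec (l : List Char) (m : Nat) (hm : m ≤ l.length + 1) :
    expensiveLoop2 (' ' :: l) (PySem.List.pyRange 1 (m : Int) 1)
      = ((l.take (m - 1)).countP (· != '0') : Int) := by
  induction m with
  | zero => simp [PySem.List.pyRange_one_eq_nil, expensiveLoop2]
  | succ m ih =>
      cases m with
      | zero => simp [PySem.List.pyRange_one_eq_nil, expensiveLoop2]
      | succ k =>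
          have hk : (k + 1 : Nat) ≤ l.length := by omega
          have hcast : ((k + 2 : Nat) : Int) = ((k + 1 : Nat) : Int) + 1 := by push_cast; ring
          rw [hcast, PySem.List.pyRange_one_succ_right (by omega)]
          unfold expensiveLoop2
          rw [List.foldl_append]
          have ihv := ih (by omega)
          unfold expensiveLoop2 at ihv
          rw [ihv]
          have hget : PySem.List.pyGetD (' ' :: l) ((k + 1 : Nat) : Int) ' ' = l[k] := by
            rw [PySem.List.pyGetD_natCast]
            simp [List.getD_eq_getElem?_getD, List.getElem?_eq_getElem (by omega : k < l.length)]
            rfl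
          simp only [List.foldl_cons, List.foldl_nil, hget]
          have htake : l.take (k + 1 + 1 - 1) = l.take (k + 1 - 1) ++ [l[k]] := by
            simp only [Nat.add_sub_cancel]
            rw [List.take_add_one]
            simp [List.getElem?_eq_getElem (by omega : k < l.length)]
          rw [htake, List.countP_append]
          by_cases hx : l[k] = '0'
          · simp [hx]
          · have hb : (l[k] != '0') = true := by simpa using hx
            simp only [ne_eq, hx, not_false_eq_true, if_true, List.countP_cons, hb,
              List.countP_nil]
            push_cast
            ring

-- stripped is a prefix of l (l = stripped ++ trailing zeros)
theorem stripped_prefix (l : List Char) :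
    l = (l.reverse.dropWhile (· == '0')).reverse ++ (l.reverse.takeWhile (· == '0')).reverse := by
  have h := List.takeWhile_append_dropWhile (p := (· == '0')) (l := l.reverse)
  rw [← List.reverse_append, h, List.reverse_reverse]

-- B's fold computes (total nonzero count, length of the trailing zero run)
theorem expensive_alt_fold_spec (l : List Char) :
    l.foldl (fun (p : Int × Int) c => if c = '0' then (p.1, p.2 + 1) else (p.1 + 1, 0)) (0, 0)
      = ((l.countP (· != '0') : Int), ((l.reverse.takeWhile (· == '0')).length : Int)) := by
  induction l using List.reverseRecOn with
  | nil => simp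
  | append_singleton xs x ih =>
      rw [List.foldl_append, ih]
      simp only [List.foldl_cons, List.foldl_nil, List.reverse_append, List.reverse_cons,
        List.reverse_nil, List.nil_append, List.cons_append, List.takeWhile_cons,
        List.countP_append]
      by_cases hx : x = '0'
      · subst hx
        simp
      · have hb : (x == '0') = false := by simpa using hx
        have hb' : (x != '0') = true := by simp [bne, hb]
        simp [hx, hb, hb']

-- ===== VERDICT (by name: the statement is the Claim_ definition above) =====
theorem expensive_spec : Claim_equal_expensive := by
  intro a _
  unfold Spec_expensive expensive expensive_alt
  simp only [PySem.Str.len_eq]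
  rw [expensiveLoop1_spec, expensive_alt_fold_spec]
  have htle : (a.toList.reverse.dropWhile (· == '0')).length ≤ a.toList.length :=
    le_trans (List.length_dropWhile_le _ _) (by simp)
  rw [expensiveLoop2_spec _ _ (by omega)]
  have hdecomp := stripped_prefix a.toList
  have hsum : (a.toList.reverse.dropWhile (· == '0')).length
      + (a.toList.reverse.takeWhile (· == '0')).length = a.toList.length := by
    conv_rhs => rw [hdecomp]
    simp
  cases ht : a.toList.reverse.dropWhile (· == '0') with
  | nil =>
      have hall : ∀ x ∈ a.toList.reverse, (x == '0') = true := by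
        rw [← List.dropWhile_eq_nil_iff]; exact ht
      have hcnt : a.toList.countP (· != '0') = 0 := by
        rw [List.countP_eq_zero]
        intro x hx
        have := hall x (by simpa using hx)
        simp [bne, this]
      rw [ht] at hsum
      simp [hcnt]
  | cons c t' =>
      rw [ht] at hdecomp hsum
      have hc : (c == '0') = false := by
        have := List.head?_dropWhile_not (· == '0') a.toList.reverse
        rw [ht] at this
        simpa using this
      have htake : a.toList.take ((c :: t').length - 1) = t'.reverse := by
        have hrev : (c :: t').reverse = t'.reverse ++ [c] := by simp
        have hlen : (c :: t').length - 1 = t'.reverse.length := by simp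
        conv_lhs => rw [hlen, hdecomp, hrev, List.append_assoc]
        exact List.take_left
      rw [htake]
      have hcl : a.toList.countP (· != '0') = t'.reverse.countP (· != '0') + 1 := by
        conv_lhs => rw [hdecomp]
        have hc' : (c != '0') = true := by simp [bne, hc]
        have hz : (a.toList.reverse.takeWhile (· == '0')).reverse.countP (· != '0') = 0 := by
          rw [List.countP_eq_zero]
          intro x hx
          rw [List.mem_reverse] at hx
          have : (x == '0') = true := List.mem_takeWhile_imp (p := (· == '0')) hx
          simp [bne, this]
        simp [List.countP_append, hz, hc']
      have hne : ((t'.reverse.countP (· != '0') : Int) + 1) ≠ 0 := by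
        have : (0 : Int) ≤ (t'.reverse.countP (· != '0') : Int) := by positivity
        omega
      have hcl' : ((a.toList.countP (· != '0') : Int)) = (t'.reverse.countP (· != '0') : Int) + 1 := by
        rw [hcl]; push_cast; ring
      simp only [hcl', hne, if_false]
      have hlen2 : ((a.toList.reverse.takeWhile (· == '0')).length : Int)
          = (a.toList.length : Int) - ((c :: t').length : Int) := by omega
      rw [hlen2]
      simp only [List.length_cons]
      push_cast
      ring
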